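-- pv_equiv track=rewrite | github.com/ashisharora24/learning_tutorials_practice | Introduction to Python/9_Searching_and_Sorting/Check_array_rotation.py | check_array_rotation
-- ===== SOURCE A (Python) =====
-- def check_array_rotation(arr,n):
--     counter=0
--     while True:
--         if arr[0]>=arr[-1]:
--             counter+=1
--             element=arr.pop(0)
--             arr.append(element)
--         else:
--             break
--     return counter
-- ===== SOURCE B (Python) =====
-- def check_array_rotation(arr, n):
--     # Single linear scan: 0 if already arr[0] < arr[-1], else the first descent index.
--     # (Does not mutate arr; A rotates arr in place.)
--     if arr[0] < arr[-1]:
--         return 0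
--     for i in range(1, len(arr)):
--         if arr[i] < arr[i - 1]:
--             return i
-- ===== Notes on version B (the rewrite author's own statement) =====
-- stated objective: faster
-- what changed: Replaces the rotate-and-retest loop (pop(0)+append per step) with one linear scan that returns the index of the first descent, without mutating the list.
import Mathlib
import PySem

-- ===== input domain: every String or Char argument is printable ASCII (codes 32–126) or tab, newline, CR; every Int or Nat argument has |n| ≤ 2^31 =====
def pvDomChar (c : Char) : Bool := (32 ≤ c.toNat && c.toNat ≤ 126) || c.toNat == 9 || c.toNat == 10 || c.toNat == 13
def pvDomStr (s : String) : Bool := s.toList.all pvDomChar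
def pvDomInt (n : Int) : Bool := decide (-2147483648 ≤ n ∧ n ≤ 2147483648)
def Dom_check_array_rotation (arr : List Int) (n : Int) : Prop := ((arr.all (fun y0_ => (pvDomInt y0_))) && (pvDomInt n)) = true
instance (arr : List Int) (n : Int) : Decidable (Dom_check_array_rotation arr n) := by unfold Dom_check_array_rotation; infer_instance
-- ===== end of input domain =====

-- B replaces A's rotate-and-retest loop by one linear scan for the first descent index (no mutation;
-- A rotates its argument in place, so the equivalence proved here is about the RETURN value only).

-- ===== PORT A =====
-- A's `while True` loop: one fuel unit per iteration; fuel arr.length suffices exactly when the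
-- Python loop terminates (otherwise Python diverges — excluded by Pre_).
def check_array_rotation_go (fuel : Nat) (arr : List Int) (counter : Int) : Int :=
  match fuel with
  | 0 => counter
  | f + 1 =>
    match PySem.List.pyGet? arr 0, PySem.List.pyGet? arr (-1) with
    | some h, some l =>
      if h ≥ l then
        -- element = arr.pop(0); arr.append(element)
        check_array_rotation_go f (arr.drop 1 ++ arr.take 1) (counter + 1)
      else counter
    | _, _ => counter  -- IndexError (empty list) — excluded by Pre_

def check_array_rotation (arr : List Int) (n : Int) : Int :=
  check_array_rotation_go arr.length arr 0

-- ===== PORT B =====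
-- the `for i in range(1, len(arr))` scan, carrying i and arr[i-1]; falls off at 0 (Python B
-- returns None there — only on all-equal lists, excluded by Pre_)
def check_array_rotation_altScan (i : Int) (prev : Int) : List Int → Int
  | [] => 0
  | x :: rest => if x < prev then i else check_array_rotation_altScan (i + 1) x rest

def check_array_rotation_alt (arr : List Int) (n : Int) : Int :=
  match PySem.List.pyGet? arr 0, PySem.List.pyGet? arr (-1) with
  | some h, some l =>
    if h < l then 0
    else
      match arr with
      | [] => 0
      | x :: rest => check_array_rotation_altScan 1 x rest
  | _, _ => 0  -- IndexError (empty list) — excluded by Pre_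

-- ===== PRECONDITION & SPEC =====
-- Pre_ excludes the empty list (A raises IndexError) and lists whose elements are all equal
-- (A loops forever); on every other list A returns normally.
def Pre_check_array_rotation (arr : List Int) (n : Int) : Prop :=
  arr ≠ [] ∧ ∃ x ∈ arr, x ≠ arr.headI
instance (arr : List Int) (n : Int) : Decidable (Pre_check_array_rotation arr n) := by
  unfold Pre_check_array_rotation; infer_instance

def pvWitness_check_array_rotation : List Int × Int := ([3, 1, 2], 3)

def Spec_check_array_rotation (arr : List Int) (n : Int) (out : Int) : Prop := out = check_array_rotation_alt arr n
instance (arr : List Int) (n : Int) (out : Int) : Decidable (Spec_check_array_rotation arr n out) := by unfold Spec_check_array_rotation; infer_instance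

-- ===== CLAIM (what is proved, stated in full; the proofs are below) =====
def Claim_equal_check_array_rotation : Prop := ∀ (arr : List Int) (n : Int), Dom_check_array_rotation arr n → Pre_check_array_rotation arr n → Spec_check_array_rotation arr n (check_array_rotation arr n)

-- ===== LEMMAS AND PROOFS =====

/-- `true` iff the chained scan prev, xs₀, xs₁, … contains a strict descent. -/
def hasDescent (prev : Int) : List Int → Bool
  | [] => false
  | x :: rest => decide (x < prev) || hasDescent x rest

/-- Key lemma: while a descent remains ahead, A's rotating loop on `suf ++ pre`
(where `pre` holds the already-rotated elements, whose last one is `prev`) computes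
exactly B's scan over `suf`. -/
lemma go_eq_altScan (suf : List Int) : ∀ (pre : List Int) (prev : Int) (c : Int) (fuel : Nat),
    pre ≠ [] → pre.getLast? = some prev → suf.length ≤ fuel → hasDescent prev suf = true →
    check_array_rotation_go fuel (suf ++ pre) c = check_array_rotation_altScan c prev suf := by
  induction suf with
  | nil => intro pre prev c fuel _ _ _ hdes; simp [hasDescent] at hdes
  | cons x rest ih =>
    intro pre prev c fuel hpre hlast hfuel hdes
    cases fuel with
    | zero => simp at hfuel
    | succ f =>
      have hget0 : PySem.List.pyGet? ((x :: rest) ++ pre) 0 = some x := by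
        simp [PySem.List.pyGet?_zero_cons]
      have hgetl : PySem.List.pyGet? ((x :: rest) ++ pre) (-1) = some prev := by
        rw [PySem.List.pyGet?_neg_one]
        rw [List.getLast?_append_of_ne_nil _ hpre]; exact hlast
      simp only [check_array_rotation_go, hget0, hgetl]
      by_cases hge : x ≥ prev
      · have hx : ¬ x < prev := not_lt.mpr hge
        have hdes' : hasDescent x rest = true := by
          simp [hasDescent, hx] at hdes; exact hdes
        rw [if_pos hge]
        have harr : ((x :: rest) ++ pre).drop 1 ++ ((x :: rest) ++ pre).take 1
            = rest ++ (pre ++ [x]) := by simp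
        rw [harr, ih (pre ++ [x]) x (c + 1) f (by simp) (by simp) (by simpa using hfuel) hdes']
        simp [check_array_rotation_altScan, hx]
      · have hx : x < prev := lt_of_not_ge hge
        rw [if_neg hge]
        simp [check_array_rotation_altScan, hx]

/-- With no descent in the chain prev, xs, the last element dominates prev. -/
lemma le_getLast_of_no_descent : ∀ (xs : List Int) (prev l : Int),
    hasDescent prev xs = false → (prev :: xs).getLast? = some l → prev ≤ l := by
  intro xs
  induction xs with
  | nil => intro prev l _ hl; simp at hl; omega
  | cons y r ih =>
    intro prev l hdes hl
    simp only [hasDescent, Bool.or_eq_false_iff, decide_eq_false_iff_not, not_lt] at hdes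
    have h1 : prev ≤ y := hdes.1
    have h2 : y ≤ l := ih y l hdes.2 (by
      rwa [List.getLast?_cons_cons] at hl)
    omega

/-- No descent and last ≤ head forces all elements equal to the head. -/
lemma all_eq_of_no_descent : ∀ (rest : List Int) (x l : Int),
    hasDescent x rest = false → (x :: rest).getLast? = some l → l ≤ x →
    ∀ y ∈ x :: rest, y = x := by
  intro rest
  induction rest with
  | nil => intro x l _ _ _ y hy; simpa using hy
  | cons z r ih =>
    intro x l hdes hl hle y hy
    simp only [hasDescent, Bool.or_eq_false_iff, decide_eq_false_iff_not, not_lt] at hdes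
    have hl' : (z :: r).getLast? = some l := by rwa [List.getLast?_cons_cons] at hl
    have hzl : z ≤ l := le_getLast_of_no_descent r z l hdes.2 hl'
    have hzx : z = x := le_antisymm (le_trans hzl hle) hdes.1
    rcases List.mem_cons.mp hy with h | h
    · exact h
    · have := ih z l hdes.2 hl' (by omega) y h
      omega

-- ===== VERDICT (by name: the statement is the Claim_ definition above) =====
theorem check_array_rotation_spec : Claim_equal_check_array_rotation := by
  intro arr n _ hPre
  unfold Spec_check_array_rotation
  obtain ⟨hne, z, hz, hzne⟩ := hPre
  cases arr with
  | nil => exact absurd rfl hne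
  | cons x rest =>
    obtain ⟨l, hl⟩ : ∃ l, (x :: rest).getLast? = some l := ⟨_, List.getLast?_eq_some_getLast (by simp)⟩
    have hget0 : PySem.List.pyGet? (x :: rest) 0 = some x := by
      simp
    have hgetl : PySem.List.pyGet? (x :: rest) (-1) = some l := by
      rw [PySem.List.pyGet?_neg_one]; exact hl
    by_cases hlt : x < l
    · -- first test already fails: both return 0
      simp only [check_array_rotation, check_array_rotation_alt, List.length_cons,
        check_array_rotation_go, hget0, hgetl]
      rw [if_neg (not_le.mpr hlt), if_pos hlt]
    · -- A rotates once then the key lemma takes over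
      have hge : x ≥ l := le_of_not_gt hlt
      have hdes : hasDescent x rest = true := by
        by_contra hfalse
        have hfalse' : hasDescent x rest = false := by
          cases h : hasDescent x rest with
          | true => exact absurd h hfalse
          | false => rfl
        have hall := all_eq_of_no_descent rest x l hfalse' hl hge
        exact hzne (by rw [hall z hz]; rfl)
      simp only [check_array_rotation, check_array_rotation_alt, List.length_cons,
        check_array_rotation_go, hget0, hgetl]
      rw [if_pos hge, if_neg hlt]
      have harr : (x :: rest).drop 1 ++ (x :: rest).take 1 = rest ++ [x] := by simp
      rw [harr, show (0:Int) + 1 = 1 from by norm_num,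
        go_eq_altScan rest [x] x 1 rest.length (by simp) (by simp) le_rfl hdes]
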